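-- pv_equiv track=rewrite | github.com/niemasd/hivtrace-true-append | dataqc_true_append.py | determine_deltas
-- ===== SOURCE A (Python) =====
-- def determine_deltas(seqs_new, seqs_old):
--     to_add = set(); to_replace = set(); to_delete = set(seqs_old.keys()); to_keep = set()
--     for ID in seqs_new:
--         if ID in seqs_old:
--             to_delete.remove(ID)
--             if seqs_new[ID] == seqs_old[ID]:
--                 to_keep.add(ID)
--             else:
--                 to_replace.add(ID)
--         else:
--             to_add.add(ID)
--     return to_add, to_replace, to_delete, to_keep
-- ===== SOURCE B (Python) =====
-- def determine_deltas(seqs_new, seqs_old):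
--     new_keys = set(seqs_new)
--     old_keys = set(seqs_old)
--     common = new_keys & old_keys
--     to_keep = {ID for ID in common if seqs_new[ID] == seqs_old[ID]}
--     to_replace = {ID for ID in common if seqs_new[ID] != seqs_old[ID]}
--     return new_keys - old_keys, to_replace, old_keys - new_keys, to_keep
-- ===== Notes on version B (the rewrite author's own statement) =====
-- stated objective: simpler
-- what changed: Replaces A's single loop over the new dict (with incremental removal from a pre-filled delete set) by direct set algebra: set differences for add/delete and two comprehensions over the intersection for keep/replace.
import Mathlib
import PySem

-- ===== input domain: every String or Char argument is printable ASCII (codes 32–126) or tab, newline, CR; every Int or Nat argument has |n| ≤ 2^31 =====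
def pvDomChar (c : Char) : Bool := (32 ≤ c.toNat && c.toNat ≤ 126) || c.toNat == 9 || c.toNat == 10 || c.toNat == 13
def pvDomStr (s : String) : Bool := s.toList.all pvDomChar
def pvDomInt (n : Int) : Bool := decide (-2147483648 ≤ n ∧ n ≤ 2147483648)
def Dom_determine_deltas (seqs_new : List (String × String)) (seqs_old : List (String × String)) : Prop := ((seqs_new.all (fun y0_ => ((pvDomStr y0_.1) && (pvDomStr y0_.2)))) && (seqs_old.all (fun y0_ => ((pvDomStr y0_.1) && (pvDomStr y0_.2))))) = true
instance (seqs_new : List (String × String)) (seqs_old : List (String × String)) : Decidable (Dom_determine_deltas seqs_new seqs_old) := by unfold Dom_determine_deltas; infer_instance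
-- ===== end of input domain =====

-- B replaces A's single loop (incremental removal from a pre-filled delete set) by direct
-- set algebra: set differences for add/delete, two comprehensions over the intersection
-- for keep/replace.  Objective: simpler.


-- ===== PORT A =====
-- the loop body of A: state (to_add, to_replace, to_delete, to_keep);
-- co ID = 'ID in seqs_old', eqv ID = 'seqs_new[ID] == seqs_old[ID]'
def pvStepA (co eqv : String → Bool)
    (st : List String × List String × List String × List String) (ID : String) :
    List String × List String × List String × List String :=
  let (ta, tr, td, tk) := st
  if co ID then
    -- to_delete.remove(ID): ID is still in to_delete here (dict keys are distinct and each
    -- is processed once), so the remove never raises; PySem.Set.discard is exact here.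
    let td' := PySem.Set.discard td ID
    if eqv ID then (ta, tr, td', PySem.Set.add tk ID)
    else (ta, PySem.Set.add tr ID, td', tk)
  else (PySem.Set.add ta ID, tr, td, tk)

def determine_deltas (seqs_new : List (String × String)) (seqs_old : List (String × String)) : List String × List String × List String × List String :=
  let dnew := PySem.Dict.ofList seqs_new
  let dold := PySem.Dict.ofList seqs_old
  -- seqs_new[ID] / seqs_old[ID] are looked up only when 'ID in' the dict holds, so getD is exact
  dnew.keys.foldl
    (pvStepA (fun ID => dold.contains ID) (fun ID => dnew.getD ID "" == dold.getD ID ""))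
    ([], [], PySem.Set.ofList dold.keys, [])

-- ===== PORT B =====
def determine_deltas_alt (seqs_new : List (String × String)) (seqs_old : List (String × String)) : List String × List String × List String × List String :=
  let dnew := PySem.Dict.ofList seqs_new
  let dold := PySem.Dict.ofList seqs_old
  let new_keys := PySem.Set.ofList dnew.keys
  let old_keys := PySem.Set.ofList dold.keys
  let common := PySem.Set.inter new_keys old_keys
  -- set comprehensions over 'common' (lookups exact: every ID of common is in both dicts)
  let to_keep := PySem.Set.ofList (common.filter (fun ID => dnew.getD ID "" == dold.getD ID ""))
  let to_replace := PySem.Set.ofList (common.filter (fun ID => !(dnew.getD ID "" == dold.getD ID "")))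
  (PySem.Set.diff new_keys old_keys, to_replace, PySem.Set.diff old_keys new_keys, to_keep)

-- ===== PRECONDITION & SPEC =====
def Spec_determine_deltas (seqs_new : List (String × String)) (seqs_old : List (String × String)) (out : List String × List String × List String × List String) : Prop := out = determine_deltas_alt seqs_new seqs_old
instance (seqs_new : List (String × String)) (seqs_old : List (String × String)) (out : List String × List String × List String × List String) : Decidable (Spec_determine_deltas seqs_new seqs_old out) := by unfold Spec_determine_deltas; infer_instance

-- ===== CLAIM (what is proved, stated in full; the proofs are below) =====
def Claim_equal_determine_deltas : Prop := ∀ (seqs_new : List (String × String)) (seqs_old : List (String × String)), Dom_determine_deltas seqs_new seqs_old → Spec_determine_deltas seqs_new seqs_old (determine_deltas seqs_new seqs_old)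

-- ===== LEMMAS AND PROOFS =====

-- closed form of A's loop over a duplicate-free key list, for accumulators disjoint from it
theorem pvLoopA_spec (co eqv : String → Bool) :
    ∀ (ks ta tr td tk : List String), ks.Nodup →
    (∀ x ∈ ks, x ∉ ta) → (∀ x ∈ ks, x ∉ tr) → (∀ x ∈ ks, x ∉ tk) →
    ks.foldl (pvStepA co eqv) (ta, tr, td, tk) =
      (ta ++ ks.filter (fun x => !co x),
       tr ++ ks.filter (fun x => co x && !eqv x),
       td.filter (fun y => !(ks.contains y && co y)),
       tk ++ ks.filter (fun x => co x && eqv x)) := by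
  intro ks
  induction ks with
  | nil => intro ta tr td tk _ _ _ _; simp
  | cons k ks ih =>
    intro ta tr td tk hnd hta htr htk
    have hknotin : k ∉ ks := (List.nodup_cons.mp hnd).1
    have hnd' : ks.Nodup := (List.nodup_cons.mp hnd).2
    simp only [List.foldl_cons]
    by_cases hco : co k
    · by_cases heq : eqv k
      · have : pvStepA co eqv (ta, tr, td, tk) k =
            (ta, tr, PySem.Set.discard td k, tk ++ [k]) := by
          simp [pvStepA, hco, heq,
            PySem.Set.add_of_not_mem (htk k (List.mem_cons_self))]
        rw [this, ih ta tr (PySem.Set.discard td k) (tk ++ [k]) hnd'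
            (fun x hx => hta x (List.mem_cons_of_mem _ hx))
            (fun x hx => htr x (List.mem_cons_of_mem _ hx))
            (fun x hx => by
              simp only [List.mem_append, List.mem_singleton]
              rintro (h | rfl)
              · exact htk x (List.mem_cons_of_mem _ hx) h
              · exact hknotin hx)]
        refine Prod.ext ?_ (Prod.ext ?_ (Prod.ext ?_ ?_)) <;> simp [hco, heq, PySem.Set.discard]
        · refine List.filter_congr (fun y _ => ?_)
          by_cases hyk : y = k
          · subst hyk; simp [hco]
          · simp [hyk]
      · have : pvStepA co eqv (ta, tr, td, tk) k =
            (ta, tr ++ [k], PySem.Set.discard td k, tk) := by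
          simp [pvStepA, hco, heq,
            PySem.Set.add_of_not_mem (htr k (List.mem_cons_self))]
        rw [this, ih ta (tr ++ [k]) (PySem.Set.discard td k) tk hnd'
            (fun x hx => hta x (List.mem_cons_of_mem _ hx))
            (fun x hx => by
              simp only [List.mem_append, List.mem_singleton]
              rintro (h | rfl)
              · exact htr x (List.mem_cons_of_mem _ hx) h
              · exact hknotin hx)
            (fun x hx => htk x (List.mem_cons_of_mem _ hx))]
        refine Prod.ext ?_ (Prod.ext ?_ (Prod.ext ?_ ?_)) <;> simp [hco, heq, PySem.Set.discard]
        · refine List.filter_congr (fun y _ => ?_)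
          by_cases hyk : y = k
          · subst hyk; simp [hco]
          · simp [hyk]
    · have : pvStepA co eqv (ta, tr, td, tk) k = (ta ++ [k], tr, td, tk) := by
        simp [pvStepA, hco, PySem.Set.add_of_not_mem (hta k (List.mem_cons_self))]
      rw [this, ih (ta ++ [k]) tr td tk hnd'
          (fun x hx => by
            simp only [List.mem_append, List.mem_singleton]
            rintro (h | rfl)
            · exact hta x (List.mem_cons_of_mem _ hx) h
            · exact hknotin hx)
          (fun x hx => htr x (List.mem_cons_of_mem _ hx))
          (fun x hx => htk x (List.mem_cons_of_mem _ hx))]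
      refine Prod.ext ?_ (Prod.ext ?_ (Prod.ext ?_ ?_)) <;> simp [hco]
      refine List.filter_congr (fun y _ => ?_)
      by_cases hyk : y = k
      · subst hyk; simp [hco]
      · simp [hyk]

-- ===== VERDICT (by name: the statement is the Claim_ definition above) =====
theorem determine_deltas_spec : Claim_equal_determine_deltas := by
  intro seqs_new seqs_old _
  unfold Spec_determine_deltas determine_deltas determine_deltas_alt
  set dnew := PySem.Dict.ofList seqs_new with hdnew
  set dold := PySem.Dict.ofList seqs_old with hdold
  have hkn : dnew.keys.Nodup := PySem.Dict.nodup_keys_ofList seqs_new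
  have hko : dold.keys.Nodup := PySem.Dict.nodup_keys_ofList seqs_old
  have hon : PySem.Set.ofList dnew.keys = dnew.keys := PySem.Set.ofList_eq_self_of_nodup _ hkn
  have hoo : PySem.Set.ofList dold.keys = dold.keys := PySem.Set.ofList_eq_self_of_nodup _ hko
  have hmemo : ∀ y : String, dold.contains y = decide (y ∈ dold.keys) := by
    intro y
    by_cases h : y ∈ dold.keys
    · simp [h, (PySem.Dict.contains_iff_mem_keys dold y).mpr h]
    · rw [Bool.eq_false_iff.mpr (fun hc => h ((PySem.Dict.contains_iff_mem_keys dold y).mp hc))]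
      simp [h]
  rw [pvLoopA_spec _ _ dnew.keys [] [] (PySem.Set.ofList dold.keys) [] hkn
      (by simp) (by simp) (by simp)]
  simp only [hon, hoo, List.nil_append, PySem.Set.inter, PySem.Set.diff]
  refine Prod.ext ?_ (Prod.ext ?_ (Prod.ext ?_ ?_)) <;> dsimp only
  · exact List.filter_congr (fun x _ => by
      simp [PySem.Set.contains_eq_listContains, hmemo, List.contains_eq_mem])
  · rw [List.filter_filter, PySem.Set.ofList_eq_self_of_nodup _ (List.Nodup.filter _ hkn)]
    exact List.filter_congr (fun x _ => by
      simp [PySem.Set.contains_eq_listContains, hmemo, List.contains_eq_mem, Bool.and_comm])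
  · refine List.filter_congr (fun y hy => ?_)
    have h2 : dold.contains y = true := (PySem.Dict.contains_iff_mem_keys dold y).mpr hy
    simp [PySem.Set.contains_eq_listContains, h2, List.contains_eq_mem]
  · rw [List.filter_filter, PySem.Set.ofList_eq_self_of_nodup _ (List.Nodup.filter _ hkn)]
    exact List.filter_congr (fun x _ => by
      simp [PySem.Set.contains_eq_listContains, hmemo, List.contains_eq_mem, Bool.and_comm])
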